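-- pv_equiv track=rewrite | github.com/mgillr/crdt-merge | crdt_merge/arrow.py | _build_key_index
-- ===== SOURCE A (Python) =====
-- from typing import (
--     Any,
--     Dict,
--     Generator,
--     Iterator,
--     List,
--     Optional,
--     Sequence,
--     Tuple,
--     Union,
-- )
--
-- def _build_key_index(
--     rows: List[Dict[str, Any]], key: str
-- ) -> Dict[Any, int]:
--     """Build {key_value: row_index} mapping. Last occurrence wins for dups."""
--     idx: Dict[Any, int] = {}
--     for i, row in enumerate(rows):
--         k = row.get(key)
--         if k is not None:
--             idx[k] = i
--     return idx
-- ===== SOURCE B (Python) =====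
-- def _build_key_index(rows, key):
--     """Map each distinct key value (in order of first appearance) to the
--     index of the last row carrying it."""
--     distinct = []
--     for row in rows:
--         k = row.get(key)
--         if k is not None and k not in distinct:
--             distinct.append(k)
--     return {k: _last_row_index(rows, key, k) for k in distinct}
--
--
-- def _last_row_index(rows, key, k):
--     """Index of the last row whose `key` entry equals k."""
--     for i in range(len(rows) - 1, -1, -1):
--         if rows[i].get(key) == k:
--             return i
-- ===== Notes on version B (the rewrite author's own statement) =====
-- stated objective: alternative
-- what changed: Replaces the single forward last-wins overwrite loop by a spec-level two-phase construction: collect the distinct key values in first-appearance order, then map each to its last row index found by a backward scan.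
import Mathlib
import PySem

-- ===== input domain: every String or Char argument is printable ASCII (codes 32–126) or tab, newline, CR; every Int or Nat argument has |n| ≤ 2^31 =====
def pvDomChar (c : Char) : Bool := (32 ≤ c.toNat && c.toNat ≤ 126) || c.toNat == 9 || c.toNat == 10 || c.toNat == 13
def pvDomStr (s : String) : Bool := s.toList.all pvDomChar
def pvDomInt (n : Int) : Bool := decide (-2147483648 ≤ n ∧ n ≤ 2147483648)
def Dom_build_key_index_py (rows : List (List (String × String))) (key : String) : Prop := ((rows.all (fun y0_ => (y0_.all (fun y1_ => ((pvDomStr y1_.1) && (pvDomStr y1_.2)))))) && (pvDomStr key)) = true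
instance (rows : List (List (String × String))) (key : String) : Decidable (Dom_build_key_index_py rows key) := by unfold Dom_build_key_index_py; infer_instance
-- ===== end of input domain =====

-- B builds the index spec-first: the distinct key values in first-appearance order, each
-- mapped to its last row index by a backward scan (alternative decomposition, not faster).

-- ===== PORT A =====
def build_key_index_py (rows : List (List (String × String))) (key : String) : List (String × Int) :=
  ((PySem.List.enumerate rows).foldl
    (fun (d : PySem.Dict String Int) p =>
      match (PySem.Dict.mk p.2).get? key with
      | some k => d.insert k p.1
      | none => d)
    PySem.Dict.empty).items

-- ===== PORT B =====
-- 'for i in range(len(rows)-1, -1, -1): if rows[i].get(key) == k: return i' — i runs over the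
-- indices len-1 .. 0 and rows[i] is the paired row, so the scan is find? over enumerate.reverse
-- (exact); the Python loop always hits for the k values B asks about, so getD is exact here.
def pvLastRowIndex (rows : List (List (String × String))) (key k : String) : Int :=
  ((((PySem.List.enumerate rows).reverse).find?
      (fun p => (PySem.Dict.mk p.2).get? key == some k)).map (·.1)).getD 0

def build_key_index_py_alt (rows : List (List (String × String))) (key : String) : List (String × Int) :=
  let distinct : List String :=
    rows.foldl
      (fun (l : List String) row =>
        match (PySem.Dict.mk row).get? key with
        | some k => if k ∈ l then l else l ++ [k]
        | none => l)
      []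
  (distinct.foldl
      (fun (d : PySem.Dict String Int) k => d.insert k (pvLastRowIndex rows key k))
      PySem.Dict.empty).items

-- ===== PRECONDITION & SPEC =====
def Spec_build_key_index_py (rows : List (List (String × String))) (key : String) (out : List (String × Int)) : Prop := out = build_key_index_py_alt rows key
instance (rows : List (List (String × String))) (key : String) (out : List (String × Int)) : Decidable (Spec_build_key_index_py rows key out) := by unfold Spec_build_key_index_py; infer_instance

-- ===== CLAIM =====
def Claim_equal_build_key_index_py : Prop := ∀ (rows : List (List (String × String))) (key : String), Dom_build_key_index_py rows key → Spec_build_key_index_py rows key (build_key_index_py rows key)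

-- ===== LEMMAS AND PROOFS =====

-- the (key value, index) pairs both programs actually act on
def pvPairs (rows : List (List (String × String))) (key : String) : List (String × Int) :=
  (PySem.List.enumerate rows).filterMap (fun p => ((PySem.Dict.mk p.2).get? key).map (fun k => (k, p.1)))

theorem pvFoldFilterMap {α β σ : Type} (l : List α) (f : α → Option β) (g : σ → β → σ) (s : σ) :
    (l.filterMap f).foldl g s
      = l.foldl (fun s a => match f a with | some b => g s b | none => s) s := by
  induction l generalizing s with
  | nil => rfl
  | cons x xs ih =>
    cases h : f x <;> simp [h, ih]

theorem pvFindFilterMap {α β : Type} (l : List α) (f : α → Option β) (q : β → Bool) :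
    (l.filterMap f).find? q = (l.find? (fun a => ((f a).map q).getD false)).bind f := by
  induction l with
  | nil => rfl
  | cons x xs ih =>
    cases hf : f x with
    | none => simp [hf, List.find?, ih]
    | some b =>
      cases hq : q b with
      | true => simp [hf, List.find?, hq]
      | false => simp [hf, List.find?, hq, ih]

theorem pvInsFold_get? (ps : List (String × Int)) (k : String) :
    ∀ d : PySem.Dict String Int,
      (ps.foldl (fun d p => d.insert p.1 p.2) d).get? k
        = ((ps.reverse.find? (fun p => p.1 == k)).map (·.2)).or (d.get? k) := by
  induction ps with
  | nil => intro d; simp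
  | cons p ps ih =>
    intro d
    simp only [List.foldl_cons, ih, List.reverse_cons, List.find?_append]
    cases h : List.find? (fun p => p.1 == k) ps.reverse with
    | some q => simp
    | none =>
      simp only [Option.none_or]
      by_cases hk : p.1 = k
      · subst hk; simp [PySem.Dict.get?_insert_self, List.find?]
      · have hb : (p.1 == k) = false := by simp [hk]
        have hins : (d.insert p.1 p.2).get? k = d.get? k := by
          rw [PySem.Dict.get?_insert]; exact if_neg (fun h => hk h.symm)
        rw [hins]; simp [List.find?, hb]

theorem pvKeys_insFold (ps : List (String × Int)) :
    (ps.foldl (fun (d : PySem.Dict String Int) p => d.insert p.1 p.2) PySem.Dict.empty).keys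
      = PySem.List.dedup (ps.map (·.1)) := by
  have h := PySem.Dict.keys_foldl_insert_key (l := ps) (key := fun p => p.1)
    (f := fun _ p => p.2) (d := (PySem.Dict.empty : PySem.Dict String Int))
  simp only [PySem.Dict.keys_empty] at h
  rw [h, PySem.Set.update_nil_left, PySem.List.dedup_eq_ofList]

theorem pvNodup_keys_insFold (ps : List (String × Int)) :
    (ps.foldl (fun (d : PySem.Dict String Int) p => d.insert p.1 p.2) PySem.Dict.empty).keys.Nodup := by
  exact PySem.Dict.nodup_keys_foldl_insert_key ps (·.1) (fun _ p => p.2) PySem.Dict.empty (by simp)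

-- B's distinct pass over the extracted key values is ordered dedup
theorem pvDistinctFold (ks : List String) :
    ∀ l : PySem.Set String,
      (ks.foldl (fun (l : List String) k => if k ∈ l then l else l ++ [k]) l)
        = PySem.Set.update l ks := by
  induction ks with
  | nil => intro l; simp [PySem.Set.update_nil]
  | cons k ks ih =>
    intro l
    simp only [List.foldl_cons, PySem.Set.update_cons]
    by_cases h : k ∈ l
    · have ha : PySem.Set.add l k = l := by simp [PySem.Set.add, PySem.Set.contains, h]
      simp only [h, if_true, ha, ih]
    · have ha : PySem.Set.add l k = l ++ [k] := by simp [PySem.Set.add, PySem.Set.contains, h]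
      simp only [h, if_false]
      rw [show l ++ [k] = PySem.Set.add l k from ha.symm, ih]

-- ===== VERDICT =====

theorem build_key_index_py_spec : Claim_equal_build_key_index_py := by
  intro rows key _
  unfold Spec_build_key_index_py build_key_index_py build_key_index_py_alt
  set ps := pvPairs rows key with hps
  -- A's row loop is the plain insert fold over the extracted (key value, index) pairs
  have hA : (PySem.List.enumerate rows).foldl
      (fun (d : PySem.Dict String Int) p =>
        match (PySem.Dict.mk p.2).get? key with
        | some k => d.insert k p.1
        | none => d) PySem.Dict.empty
      = ps.foldl (fun d p => d.insert p.1 p.2) PySem.Dict.empty := by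
    rw [hps, pvPairs, pvFoldFilterMap]
    apply List.foldl_ext
    intro d p _
    cases (PySem.Dict.mk p.2).get? key <;> rfl
  -- B's distinct pass is the ordered dedup of the extracted key values
  have hDistinct : rows.foldl
      (fun (l : List String) row =>
        match (PySem.Dict.mk row).get? key with
        | some k => if k ∈ l then l else l ++ [k]
        | none => l) []
      = PySem.List.dedup (ps.map (·.1)) := by
    have h1 : rows.foldl
        (fun (l : List String) row =>
          match (PySem.Dict.mk row).get? key with
          | some k => if k ∈ l then l else l ++ [k]
          | none => l) []
        = (ps.map (·.1)).foldl (fun l k => if k ∈ l then l else l ++ [k]) [] := by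
      rw [hps, pvPairs, List.foldl_map, pvFoldFilterMap]
      have : rows = (PySem.List.enumerate rows).map (·.2) := by
        simp [PySem.List.map_snd_enumerate]
      conv_lhs => rw [this, List.foldl_map]
      apply List.foldl_ext
      intro l p _
      cases (PySem.Dict.mk p.2).get? key <;> rfl
    rw [h1, pvDistinctFold, PySem.Set.update_nil_left, PySem.List.dedup_eq_ofList]
  rw [hA, hDistinct]
  -- B's final dict comprehension over distinct fresh keys appends them one by one
  have hB : ((PySem.List.dedup (ps.map (·.1))).foldl
        (fun (d : PySem.Dict String Int) k => d.insert k (pvLastRowIndex rows key k)) PySem.Dict.empty).items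
      = (PySem.List.dedup (ps.map (·.1))).map (fun k => (k, pvLastRowIndex rows key k)) := by
    have := PySem.Dict.items_foldl_insert_fresh (l := PySem.List.dedup (ps.map (·.1)))
      (k := id) (v := fun k => pvLastRowIndex rows key k) (d := (PySem.Dict.empty : PySem.Dict String Int))
      (by intro a _; simp) (by simpa using PySem.List.nodup_dedup (ps.map (·.1)))
    simp only [id] at this; exact this
  rw [hB]
  rw [PySem.Dict.items_eq_map_keys _ (pvNodup_keys_insFold ps) 0, pvKeys_insFold]
  apply List.map_congr_left
  intro k _
  -- A's value at k: the last pair for k in ps; B's: the backward scan index — the same option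
  have hAv := pvInsFold_get? ps k PySem.Dict.empty
  simp only [PySem.Dict.get?_empty, Option.or_none] at hAv
  rw [PySem.Dict.getD_eq_get?_getD, hAv, pvLastRowIndex]
  -- relate the two find?s through filterMap over the reversed enumeration
  have hrev : ps.reverse = ((PySem.List.enumerate rows).reverse).filterMap
      (fun p => ((PySem.Dict.mk p.2).get? key).map (fun k' => (k', p.1))) := by
    rw [hps, pvPairs, List.filterMap_reverse]
  rw [hrev, pvFindFilterMap]
  have hpred : (fun p : Int × List (String × String) =>
        ((((PySem.Dict.mk p.2).get? key).map (fun k' => (k', p.1))).map (fun q => q.1 == k)).getD false)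
      = (fun p : Int × List (String × String) => (PySem.Dict.mk p.2).get? key == some k) := by
    funext p
    cases h : (PySem.Dict.mk p.2).get? key <;> simp
  rw [hpred]
  cases hf : ((PySem.List.enumerate rows).reverse).find?
      (fun p => (PySem.Dict.mk p.2).get? key == some k) with
  | none => simp
  | some p =>
    have hp := List.find?_some hf
    have : (PySem.Dict.mk p.2).get? key = some k := by
      simp at hp; exact hp
    simp [this]
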